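-- pv_equiv track=rewrite | github.com/scottmsilver/precor-9.3x | monitor.py | decode_bracketed
-- ===== SOURCE A (Python) =====
-- KNOWN_BYTES = {
--     0xA0: "Address",
--     0xAC: "HB marker",
--     0xA5: "HB marker2",
--     0xF1: "Speed cmd",
--     0xF2: "Status",
--     0xF5: "Stop cmd",
--     0xF6: "Incline cmd",
--     0xF9: "Heartbeat",
--     0x59: "Idle byte",
-- }
--
-- def decode_bracketed(swapped):
--     parts = []
--     has_unknown = False
--     i = 0
--     while i < len(swapped):
--         b = swapped[i]
--         if b in KNOWN_BYTES:
--             if b == 0x59 and i + 2 < len(swapped) and swapped[i+1] == 0x59 and swapped[i+2] == 0x59: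
--                 parts.append("IDLE")
--                 i += 3
--                 continue
--             parts.append(f"{b:02X}:{KNOWN_BYTES[b].split()[0].lower()}")
--         else:
--             parts.append(f"{b:02X}:???")
--             has_unknown = True
--         i += 1
--     return "[" + "|".join(parts) + "]", has_unknown
-- ===== SOURCE B (Python) =====
-- KNOWN_BYTES = {
--     0xA0: "Address",
--     0xAC: "HB marker",
--     0xA5: "HB marker2",
--     0xF1: "Speed cmd",
--     0xF2: "Status",
--     0xF5: "Stop cmd",
--     0xF6: "Incline cmd",
--     0xF9: "Heartbeat",
--     0x59: "Idle byte",
-- }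
--
--
-- def _token(b):
--     if b in KNOWN_BYTES:
--         return f"{b:02X}:{KNOWN_BYTES[b].split()[0].lower()}"
--     return f"{b:02X}:???"
--
--
-- def _flush(run):
--     # a maximal run of `run` idle bytes collapses greedily: one IDLE per full
--     # triple, then the leftover idles as single tokens
--     return ["IDLE"] * (run // 3) + ["59:idle"] * (run % 3)
--
--
-- def decode_bracketed(swapped):
--     parts = []
--     run = 0
--     for b in swapped:
--         if b == 0x59:
--             run += 1
--         else:
--             parts += _flush(run)
--             run = 0
--             parts.append(_token(b))
--     parts += _flush(run)
--     has_unknown = any(b not in KNOWN_BYTES for b in swapped)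
--     return "[" + "|".join(parts) + "]", has_unknown
-- ===== Notes on version B (the rewrite author's own statement) =====
-- stated objective: alternative
-- what changed: Replaces A's index/look-ahead while-loop (which peeks at swapped[i+1], swapped[i+2] and jumps i by 3) with a single left-to-right pass that only maintains a counter of the current run of idle bytes, collapsing each maximal run in closed form (run//3 IDLE tokens plus run%3 single tokens); the unknown-byte flag is computed by a separate any() pass.
import Mathlib
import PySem

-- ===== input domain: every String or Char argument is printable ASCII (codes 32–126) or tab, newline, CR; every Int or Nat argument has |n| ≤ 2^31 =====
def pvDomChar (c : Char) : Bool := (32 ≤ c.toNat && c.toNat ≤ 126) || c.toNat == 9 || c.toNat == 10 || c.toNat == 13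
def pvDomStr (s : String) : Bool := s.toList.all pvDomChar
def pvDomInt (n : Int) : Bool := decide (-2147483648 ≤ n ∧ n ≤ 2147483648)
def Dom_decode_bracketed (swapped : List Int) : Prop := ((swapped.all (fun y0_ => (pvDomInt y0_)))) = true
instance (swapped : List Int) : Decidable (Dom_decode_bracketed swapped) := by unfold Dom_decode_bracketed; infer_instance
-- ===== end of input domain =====

-- B replaces A's index/look-ahead scan by a single pass keeping a run counter for
-- consecutive idle bytes, collapsed in closed form (run//3 IDLEs + run%3 singles);
-- objective: simpler decomposition, same cost.

-- ===== PORT A =====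
def KNOWN_BYTES : PySem.Dict Int String := PySem.Dict.ofList [
  (0xA0, "Address"), (0xAC, "HB marker"), (0xA5, "HB marker2"),
  (0xF1, "Speed cmd"), (0xF2, "Status"), (0xF5, "Stop cmd"),
  (0xF6, "Incline cmd"), (0xF9, "Heartbeat"), (0x59, "Idle byte")]

-- f"{n:02X}": uppercase hex, zero-padded to width 2, the sign counted in the width
-- (exact for width 2: a negative number is '-' followed by ≥ 1 digit, so never padded)
def pyHexUpper (n : Nat) : List Char := (Nat.toDigits 16 n).map PySem.Chars.upperChar
def pyHex02 (b : Int) : String :=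
  if b < 0 then String.ofList ('-' :: pyHexUpper (-b).toNat)
  else String.ofList (List.replicate (2 - (pyHexUpper b.toNat).length) '0' ++ pyHexUpper b.toNat)

-- f"{b:02X}:{KNOWN_BYTES[b].split()[0].lower()}" (only reached when b is a key, so getD "" is safe)
def pvTokKnown (b : Int) : String :=
  pyHex02 b ++ ":" ++ PySem.Str.lower ((PySem.Str.split₀ ((KNOWN_BYTES.get? b).getD "")).headD "")

-- A's while-loop over the index i, as the recursion on the remaining suffix swapped[i:]:
-- swapped[i] is the head, 'i + 2 < len(swapped) and swapped[i+1] == 0x59 and swapped[i+2] == 0x59'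
-- is the look-ahead at the next two elements, 'i += 3' drops three elements.
def decode_bracketed_loop : List Int → List String × Bool
  | [] => ([], false)
  | b :: rest =>
    if (KNOWN_BYTES.get? b).isSome then
      match rest with
      | c :: d :: t =>
        if b = 0x59 ∧ c = 0x59 ∧ d = 0x59 then
          ("IDLE" :: (decode_bracketed_loop t).1, (decode_bracketed_loop t).2)
        else
          (pvTokKnown b :: (decode_bracketed_loop (c :: d :: t)).1,
           (decode_bracketed_loop (c :: d :: t)).2)
      | short =>
        (pvTokKnown b :: (decode_bracketed_loop short).1, (decode_bracketed_loop short).2)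
    else
      ((pyHex02 b ++ ":???") :: (decode_bracketed_loop rest).1,
       true || (decode_bracketed_loop rest).2)

def decode_bracketed (swapped : List Int) : String × Bool :=
  let r := decode_bracketed_loop swapped
  ("[" ++ PySem.Str.join "|" r.1 ++ "]", r.2)

-- ===== PORT B =====
def pvToken (b : Int) : String :=
  if (KNOWN_BYTES.get? b).isSome then pvTokKnown b else pyHex02 b ++ ":???"

def pvFlush (run : Int) : List String :=
  List.replicate (PySem.Int.floordiv run 3).toNat "IDLE" ++
  List.replicate (PySem.Int.mod run 3).toNat "59:idle"

def pvStep (st : List String × Int) (b : Int) : List String × Int :=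
  if b = 0x59 then (st.1, st.2 + 1) else (st.1 ++ pvFlush st.2 ++ [pvToken b], 0)

def decode_bracketed_alt (swapped : List Int) : String × Bool :=
  let st := swapped.foldl pvStep ([], 0)
  let parts := st.1 ++ pvFlush st.2
  ("[" ++ PySem.Str.join "|" parts ++ "]",
   swapped.any (fun b => !(KNOWN_BYTES.get? b).isSome))

-- ===== PRECONDITION & SPEC =====
def Spec_decode_bracketed (swapped : List Int) (out : String × Bool) : Prop := out = decode_bracketed_alt swapped
instance (swapped : List Int) (out : String × Bool) : Decidable (Spec_decode_bracketed swapped out) := by unfold Spec_decode_bracketed; infer_instance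

-- ===== CLAIM (what is proved, stated in full; the proofs are below) =====
def Claim_equal_decode_bracketed : Prop := ∀ (swapped : List Int), Dom_decode_bracketed swapped → Spec_decode_bracketed swapped (decode_bracketed swapped)

-- ===== LEMMAS AND PROOFS =====

def natFlush (k : Nat) : List String :=
  List.replicate (k / 3) "IDLE" ++ List.replicate (k % 3) "59:idle"

theorem pvFlush_coe (k : Nat) : pvFlush (k : Int) = natFlush k := by
  have h1 : (PySem.Int.floordiv (k : Int) 3).toNat = k / 3 := by
    rw [PySem.Int.floordiv_eq_ediv_of_pos (by norm_num)]; omega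
  have h2 : (PySem.Int.mod (k : Int) 3).toNat = k % 3 := by
    rw [PySem.Int.mod_eq_emod_of_pos (by norm_num)]; omega
  unfold pvFlush natFlush
  rw [h1, h2]

theorem natFlush_succ3 (k : Nat) : natFlush (k + 3) = "IDLE" :: natFlush k := by
  unfold natFlush
  have h1 : (k + 3) / 3 = k / 3 + 1 := by omega
  have h2 : (k + 3) % 3 = k % 3 := by omega
  rw [h1, h2, List.replicate_succ]
  simp

theorem known59 : (KNOWN_BYTES.get? 89).isSome = true := by decide

theorem known59x : KNOWN_BYTES.get? 89 = some "Idle byte" := by decide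

theorem tok59 : pvTokKnown 89 = "59:idle" := by decide

-- A's flag is exactly "some byte is unknown"
theorem aFlag_eq (l : List Int) :
    (decode_bracketed_loop l).2 = l.any (fun b => !(KNOWN_BYTES.get? b).isSome) := by
  fun_induction decode_bracketed_loop l
  all_goals simp_all [known59x]
  all_goals intro hnone
  all_goals simp_all

-- B: shifting the parts accumulator out of the fold
theorem pvStep_shift (l : List Int) (p : List String) (r : Int) :
    l.foldl pvStep (p, r) = (p ++ (l.foldl pvStep ([], r)).1, (l.foldl pvStep ([], r)).2) := by
  induction l generalizing p r with
  | nil => simp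
  | cons b l ih =>
    by_cases hb : b = 89
    · subst hb
      simp only [List.foldl_cons, pvStep]
      exact ih p (r + 1)
    · simp only [List.foldl_cons, pvStep, if_neg hb]
      rw [ih (p ++ pvFlush r ++ [pvToken b]) 0, ih ([] ++ pvFlush r ++ [pvToken b]) 0]
      simp

-- B: a block of k idle bytes just raises the counter
theorem pvFold_idle (k : Nat) (l : List Int) (r : Int) :
    (List.replicate k 89 ++ l).foldl pvStep ([], r) = l.foldl pvStep ([], r + k) := by
  induction k generalizing r with
  | zero => simp
  | succ k ih =>
    rw [List.replicate_succ]
    have hstep : pvStep ([], r) 89 = ([], r + 1) := by simp [pvStep]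
    simp only [List.cons_append, List.foldl_cons, hstep]
    have harith : r + 1 + (k : Int) = r + (k + 1 : Nat) := by push_cast; ring
    rw [ih (r + 1), harith]

-- B's parts for a list, as one function of the list
def bParts (l : List Int) : List String :=
  (l.foldl pvStep ([], 0)).1 ++ pvFlush (l.foldl pvStep ([], 0)).2

theorem bParts_run (k : Nat) (b : Int) (t : List Int) (hb : b ≠ 89) :
    bParts (List.replicate k 89 ++ b :: t) = natFlush k ++ pvToken b :: bParts t := by
  unfold bParts
  rw [pvFold_idle k (b :: t) 0]
  simp only [List.foldl_cons, pvStep, if_neg hb, zero_add]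
  rw [pvStep_shift]
  simp [pvFlush_coe, List.append_assoc]

theorem bParts_all_idle (k : Nat) :
    bParts (List.replicate k 89) = natFlush k := by
  unfold bParts
  rw [← List.append_nil (List.replicate k 89), pvFold_idle k [] 0]
  simp [pvFlush_coe]

-- A on a maximal idle run followed by a non-idle (or empty) remainder
theorem aLoop_idle_run : ∀ (k : Nat) (l : List Int), (∀ x, l.head? = some x → x ≠ 89) →
    decode_bracketed_loop (List.replicate k 89 ++ l) =
      (natFlush k ++ (decode_bracketed_loop l).1, (decode_bracketed_loop l).2) := by
  intro k
  induction k using Nat.strong_induction_on with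
  | _ k ih =>
    intro l hl
    match k with
    | 0 => simp [natFlush]
    | 1 =>
      have h1 : natFlush 1 = ["59:idle"] := by decide
      rw [List.replicate_succ]
      cases l with
      | nil => simp [decode_bracketed_loop, known59, h1, tok59]
      | cons c l' =>
        have hc : c ≠ 89 := hl c rfl
        cases l' with
        | nil => simp [decode_bracketed_loop, known59, h1, tok59]
        | cons d t =>
          simp only [List.replicate_zero, List.nil_append,
            List.cons_append, decode_bracketed_loop]
          simp [hc, h1, tok59, known59x]
    | 2 =>
      have h2 : natFlush 2 = "59:idle" :: natFlush 1 := by decide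
      have e : List.replicate 2 89 ++ l = 89 :: (List.replicate 1 89 ++ l) := by
        simp [List.replicate_succ]
      rw [e]
      cases l with
      | nil =>
        have e1 : List.replicate 1 89 ++ ([] : List Int) = [89] := by simp
        rw [e1]
        simp [decode_bracketed_loop, known59, tok59]
        decide
      | cons c t =>
        have hc : c ≠ 89 := hl c rfl
        have htail := ih 1 (by omega) (c :: t) hl
        simp only [List.replicate_succ, List.replicate_zero, List.nil_append,
          List.cons_append] at htail ⊢
        simp only [decode_bracketed_loop]
        simp [hc, htail, h2, tok59, known59x]
    | (k + 3) =>
      have e : List.replicate (k + 3) 89 ++ l =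
          89 :: 89 :: 89 :: (List.replicate k 89 ++ l) := by
        simp [List.replicate_succ]
      rw [e]
      simp only [decode_bracketed_loop]
      simp [ih k (by omega) l hl, natFlush_succ3, known59x]

theorem aLoop_head_ne (b : Int) (l : List Int) (hb : b ≠ 89) :
    decode_bracketed_loop (b :: l) =
      (pvToken b :: (decode_bracketed_loop l).1,
       (!(KNOWN_BYTES.get? b).isSome) || (decode_bracketed_loop l).2) := by
  by_cases hk : (KNOWN_BYTES.get? b).isSome
  · cases l with
    | nil => simp [decode_bracketed_loop, pvToken, hk]
    | cons c l' =>
      cases l' with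
      | nil => simp [decode_bracketed_loop, pvToken, hk]
      | cons d t =>
        simp only [decode_bracketed_loop, if_pos hk]
        rw [if_neg (by tauto)]
        simp [pvToken, hk]
  · rw [decode_bracketed_loop.eq_def]
    simp [hk, pvToken]

theorem head_dropWhile {α : Type} (p : α → Bool) (l : List α) (x : α)
    (h : (l.dropWhile p).head? = some x) : p x = false := by
  induction l with
  | nil => simp [List.dropWhile] at h
  | cons a t ih =>
    rw [List.dropWhile_cons] at h
    by_cases hp : p a
    · exact ih (by simpa [hp] using h)
    · simp only [hp] at h
      simp at h
      rw [← h]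
      exact Bool.of_not_eq_true hp

-- the central lemma: A's parts list equals B's
theorem parts_eq (l : List Int) : (decode_bracketed_loop l).1 = bParts l := by
  have main : ∀ n (l : List Int), l.length ≤ n → (decode_bracketed_loop l).1 = bParts l := by
    intro n
    induction n with
    | zero =>
      intro l hl
      have : l = [] := List.eq_nil_of_length_eq_zero (by omega)
      subst this
      simp only [decode_bracketed_loop, bParts, List.foldl_nil]
      decide
    | succ n ih =>
      intro l hl
      set p : Int → Bool := fun b => b == 89 with hp
      set k := (l.takeWhile p).length with hk
      set m := l.dropWhile p with hm
      have hsplit : List.replicate k 89 ++ m = l := by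
        have htw : l.takeWhile p = List.replicate k 89 := by
          rw [List.eq_replicate_iff]
          refine ⟨rfl, ?_⟩
          intro b hb
          have := List.mem_takeWhile_imp hb
          simpa [hp] using this
        rw [← htw, hm, List.takeWhile_append_dropWhile]
      have hhead : ∀ x, m.head? = some x → x ≠ 89 := by
        intro x hx
        have := head_dropWhile p l x (hm ▸ hx)
        simpa [hp] using this
      cases hmc : m with
      | nil =>
        have : l = List.replicate k 89 := by rw [← hsplit, hmc, List.append_nil]
        rw [this, bParts_all_idle]
        have := aLoop_idle_run k [] (by simp)
        simp only [List.append_nil] at this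
        rw [this]
        simp [decode_bracketed_loop]
      | cons b t =>
        have hb : b ≠ 89 := hhead b (by rw [hmc]; rfl)
        have hlen : t.length ≤ n := by
          have : l.length = k + 1 + t.length := by
            rw [← hsplit, hmc]; simp; omega
          omega
        rw [← hsplit, hmc]
        rw [aLoop_idle_run k (b :: t) (by rw [hmc] at hhead; exact hhead)]
        rw [bParts_run k b t hb]
        rw [aLoop_head_ne b t hb]
        simp [ih t hlen]
  exact main l.length l le_rfl

-- ===== VERDICT (by name: the statement is the Claim_ definition above) =====
theorem decode_bracketed_spec : Claim_equal_decode_bracketed := by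
  intro swapped _
  unfold Spec_decode_bracketed decode_bracketed decode_bracketed_alt
  show ("[" ++ PySem.Str.join "|" (decode_bracketed_loop swapped).1 ++ "]",
        (decode_bracketed_loop swapped).2)
     = ("[" ++ PySem.Str.join "|"
          ((swapped.foldl pvStep ([], 0)).1 ++ pvFlush (swapped.foldl pvStep ([], 0)).2) ++ "]",
        swapped.any fun b => !(KNOWN_BYTES.get? b).isSome)
  rw [parts_eq, aFlag_eq]
  rfl
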